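-- pv_equiv track=rewrite | github.com/hima-v/py_dev | CodeChef_Beginner/practice/snapchat2.py | scount
-- ===== SOURCE A (Python) =====
-- def scount(n,l1,l2):
--     score=0
--     streak=[0]
--     i=0
--     for i in range (0,n):
--         if(l1[i]!=0 and l2[i]!=0):
--             score+=1
--             streak.append(score)
--         else:
--             score=0
--     return(max(streak))
-- ===== SOURCE B (Python) =====
-- def scount(n, l1, l2):
--     # Two-pointer run extraction: scan each maximal run where both arrays are
--     # nonzero in one inner sweep, collect the run lengths, take their max.
--     runs = []
--     i = 0
--     while i < n:
--         j = i
--         while j < n and l1[j] != 0 and l2[j] != 0: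
--             j += 1
--         if j > i:
--             runs.append(j - i)
--             i = j
--         else:
--             i += 1
--     return max(runs, default=0)
-- ===== Notes on version B (the rewrite author's own statement) =====
-- stated objective: alternative
-- what changed: B replaces A's single running-score accumulator (streak history list plus final max()) with a two-pointer run-extraction scan: an inner sweep measures each maximal run where both arrays are nonzero, the outer loop jumps past it, and the answer is max over the collected run lengths.
import Mathlib
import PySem

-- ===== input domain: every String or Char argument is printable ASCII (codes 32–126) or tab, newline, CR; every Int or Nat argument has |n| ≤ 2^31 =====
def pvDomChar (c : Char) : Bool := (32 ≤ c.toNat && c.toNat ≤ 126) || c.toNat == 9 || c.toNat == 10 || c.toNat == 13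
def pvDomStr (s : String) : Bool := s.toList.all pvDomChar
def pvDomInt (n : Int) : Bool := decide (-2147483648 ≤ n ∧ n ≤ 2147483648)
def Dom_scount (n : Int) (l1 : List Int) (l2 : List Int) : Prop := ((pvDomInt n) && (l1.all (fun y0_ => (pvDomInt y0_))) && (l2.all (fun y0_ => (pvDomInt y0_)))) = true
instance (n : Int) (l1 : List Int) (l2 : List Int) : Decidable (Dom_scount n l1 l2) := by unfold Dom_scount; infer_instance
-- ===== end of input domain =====

-- B replaces A's running-score accumulator and streak-history list with a two-pointer
-- run-extraction scan (inner sweep per maximal run, max over collected run lengths): alternative.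
-- ===== PORT A =====
def scount (n : Int) (l1 : List Int) (l2 : List Int) : Int :=
  let st := (PySem.List.pyRange 0 n 1).foldl
    (fun (st : Int × List Int) i =>
      if PySem.List.pyGetD l1 i 0 ≠ 0 ∧ PySem.List.pyGetD l2 i 0 ≠ 0 then
        (st.1 + 1, st.2 ++ [st.1 + 1])
      else (0, st.2)) (0, [(0 : Int)])
  (PySem.List.max? st.2 (fun x => x)).getD 0

-- ===== PORT B =====
-- inner while loop: advance j while j < n and both entries are nonzero
def scountInner (n : Int) (l1 : List Int) (l2 : List Int) (j : Int) : Int :=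
  if j < n ∧ PySem.List.pyGetD l1 j 0 ≠ 0 ∧ PySem.List.pyGetD l2 j 0 ≠ 0 then
    scountInner n l1 l2 (j + 1)
  else j
termination_by (n - j).toNat
decreasing_by omega

-- outer while loop: collect the length of each maximal run, jumping past it
def scountOuter (n : Int) (l1 : List Int) (l2 : List Int) (i : Int) (runs : List Int) : List Int :=
  if hi : i < n then
    let j := scountInner n l1 l2 i
    if hj : i < j then scountOuter n l1 l2 j (runs ++ [j - i])
    else scountOuter n l1 l2 (i + 1) runs
  else runs
termination_by (n - i).toNat
decreasing_by all_goals omega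

def scount_alt (n : Int) (l1 : List Int) (l2 : List Int) : Int :=
  let runs := scountOuter n l1 l2 0 []
  (PySem.List.max? runs (fun x => x)).getD 0

-- ===== PRECONDITION & SPEC =====
-- Pre_ excludes exactly the inputs on which A raises IndexError: an i < n with i out of range for l1,
-- or (when l1[i] != 0, by short-circuit) out of range for l2.
def Pre_scount (n : Int) (l1 : List Int) (l2 : List Int) : Prop :=
  ∀ i ∈ List.range (min n.toNat (l1.length + 1)), i < l1.length ∧ (l1.getD i 0 ≠ 0 → i < l2.length)
instance (n : Int) (l1 : List Int) (l2 : List Int) : Decidable (Pre_scount n l1 l2) := by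
  unfold Pre_scount; infer_instance
def pvWitness_scount : Int × List Int × List Int := (3, [1, 2, 0], [1, 1, 5])
def Spec_scount (n : Int) (l1 : List Int) (l2 : List Int) (out : Int) : Prop := out = scount_alt n l1 l2
instance (n : Int) (l1 : List Int) (l2 : List Int) (out : Int) : Decidable (Spec_scount n l1 l2 out) := by unfold Spec_scount; infer_instance

-- ===== CLAIM (what is proved, stated in full; the proofs are below) =====
def Claim_equal_scount : Prop := ∀ (n : Int) (l1 : List Int) (l2 : List Int), Dom_scount n l1 l2 → Pre_scount n l1 l2 → Spec_scount n l1 l2 (scount n l1 l2)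

-- ===== LEMMAS AND PROOFS =====

-- A's pair-fold reformulation: A's state (score, 0 :: t) tracks (cur, best) with best = t.foldl max 0.
theorem scount_loop_eq (c : Int → Prop) [DecidablePred c] :
    ∀ (L : List Int) (s b : Int) (t : List Int), 0 ≤ b → b = t.foldl max 0 →
    (L.foldl (fun (st : Int × List Int) i =>
        if c i then (st.1 + 1, st.2 ++ [st.1 + 1]) else (0, st.2)) (s, (0 : Int) :: t)).1
      = (L.foldl (fun (p : Int × Int) i =>
          let cur := if c i then p.1 + 1 else 0
          (cur, if p.2 < cur then cur else p.2)) (s, b)).1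
    ∧ ∃ t', (L.foldl (fun (st : Int × List Int) i =>
        if c i then (st.1 + 1, st.2 ++ [st.1 + 1]) else (0, st.2)) (s, (0 : Int) :: t)).2
          = (0 : Int) :: t'
      ∧ (L.foldl (fun (p : Int × Int) i =>
          let cur := if c i then p.1 + 1 else 0
          (cur, if p.2 < cur then cur else p.2)) (s, b)).2 = t'.foldl max 0
      ∧ 0 ≤ (L.foldl (fun (p : Int × Int) i =>
          let cur := if c i then p.1 + 1 else 0
          (cur, if p.2 < cur then cur else p.2)) (s, b)).2 := by
  intro L
  induction L with
  | nil =>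
    intro s b t hb hbt
    exact ⟨rfl, t, rfl, hbt, hb⟩
  | cons i L ih =>
    intro s b t hb hbt
    by_cases hc : c i
    · simp only [List.foldl_cons, if_pos hc]
      have h1 : ((0 : Int) :: t) ++ [s + 1] = (0 : Int) :: (t ++ [s + 1]) := by simp
      have h2 : (if b < s + 1 then s + 1 else b) = (t ++ [s + 1]).foldl max 0 := by
        rw [List.foldl_append]
        simp only [List.foldl_cons, List.foldl_nil, ← hbt, max_def]
        split_ifs <;> omega
      rw [h1]
      exact ih (s + 1) (if b < s + 1 then s + 1 else b) (t ++ [s + 1])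
        (by split_ifs <;> omega) h2
    · simp only [List.foldl_cons, if_neg hc]
      have h0 : (if b < (0 : Int) then (0 : Int) else b) = b := if_neg (by omega)
      rw [h0]
      exact ih 0 b t hb hbt

-- scountInner facts
theorem scountInner_ge (n : Int) (l1 l2 : List Int) : ∀ j, j ≤ scountInner n l1 l2 j := by
  intro j
  fun_induction scountInner with
  | case1 j h ih => omega
  | case2 j h => omega

theorem scountInner_le (n : Int) (l1 l2 : List Int) : ∀ j, j ≤ n → scountInner n l1 l2 j ≤ n := by
  intro j
  fun_induction scountInner with
  | case1 j h ih => intro _; exact ih (by omega)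
  | case2 j h => intro hj; exact hj

theorem scountInner_cond (n : Int) (l1 l2 : List Int) : ∀ j m, j ≤ m → m < scountInner n l1 l2 j →
    (PySem.List.pyGetD l1 m 0 ≠ 0 ∧ PySem.List.pyGetD l2 m 0 ≠ 0) := by
  intro j
  fun_induction scountInner with
  | case1 j h ih =>
    intro m hjm hm
    rcases eq_or_lt_of_le hjm with rfl | hlt
    · exact h.2
    · exact ih m (by omega) hm
  | case2 j h =>
    intro m hjm hm; omega

theorem scountInner_stop (n : Int) (l1 l2 : List Int) (j : Int) :
    ¬(scountInner n l1 l2 j < n ∧ PySem.List.pyGetD l1 (scountInner n l1 l2 j) 0 ≠ 0 ∧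
      PySem.List.pyGetD l2 (scountInner n l1 l2 j) 0 ≠ 0) := by
  fun_induction scountInner with
  | case1 j h ih => exact ih
  | case2 j h => exact h

theorem scountOuter_acc (n : Int) (l1 l2 : List Int) : ∀ (k : Nat) (i : Int), (n - i).toNat = k →
    ∀ runs, scountOuter n l1 l2 i runs = runs ++ scountOuter n l1 l2 i [] := by
  intro k
  induction k using Nat.strong_induction_on with
  | _ k IH =>
    intro i hk runs
    conv_lhs => rw [scountOuter]
    conv_rhs => rw [scountOuter]
    by_cases hi : i < n
    · simp only [dif_pos hi]
      by_cases hj : i < scountInner n l1 l2 i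
      · simp only [dif_pos hj]
        rw [IH (n - scountInner n l1 l2 i).toNat (by omega) _ rfl (runs ++ [scountInner n l1 l2 i - i]),
            IH (n - scountInner n l1 l2 i).toNat (by omega) _ rfl ([] ++ [scountInner n l1 l2 i - i])]
        simp
      · simp only [dif_neg hj]
        exact IH (n - (i + 1)).toNat (by omega) _ rfl runs
    · simp [dif_neg hi]

-- run segment: fold of the pair step over a range where the condition holds throughout
theorem runFold (l1 l2 : List Int) : ∀ (k : Nat) (i j cur best : Int), (j - i).toNat = k → i ≤ j →
    (∀ m, i ≤ m → m < j → (PySem.List.pyGetD l1 m 0 ≠ 0 ∧ PySem.List.pyGetD l2 m 0 ≠ 0)) →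
    0 ≤ cur → cur ≤ best →
    ((PySem.List.pyRange i j 1).foldl (fun (p : Int × Int) i =>
        let cur := if PySem.List.pyGetD l1 i 0 ≠ 0 ∧ PySem.List.pyGetD l2 i 0 ≠ 0 then p.1 + 1 else 0
        (cur, if p.2 < cur then cur else p.2)) (cur, best))
      = (cur + (j - i), max best (cur + (j - i))) := by
  intro k
  induction k with
  | zero =>
    intro i j cur best hk hij hc hcur hcb
    have : j = i := by omega
    subst this
    rw [PySem.List.pyRange_one_eq_nil le_rfl]
    simp only [List.foldl_nil, sub_self, add_zero, max_eq_left hcb]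
  | succ k ih =>
    intro i j cur best hk hij hc hcur hcb
    rw [PySem.List.pyRange_one_cons (by omega)]
    simp only [List.foldl_cons]
    rw [if_pos (hc i le_rfl (by omega))]
    have h2 : (if best < cur + 1 then cur + 1 else best) = max best (cur + 1) := by
      simp [max_def]; split_ifs <;> omega
    rw [h2]
    rw [ih (i+1) j (cur+1) (max best (cur+1)) (by omega) (by omega)
      (fun m hm1 hm2 => hc m (by omega) hm2) (by omega) (le_max_right _ _)]
    have e1 : cur + 1 + (j - (i + 1)) = cur + (j - i) := by omega
    have e2 : max (max best (cur + 1)) (cur + (j - i)) = max best (cur + (j - i)) := by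
      simp only [max_def]; split_ifs <;> omega
    rw [e1, e2]

-- main loop correspondence: pair fold from a fresh run start = max over B's collected runs
theorem mainLoop (n : Int) (l1 l2 : List Int) : ∀ (k : Nat) (i best : Int), (n - i).toNat = k →
    0 ≤ best →
    ((PySem.List.pyRange i n 1).foldl (fun (p : Int × Int) i =>
        let cur := if PySem.List.pyGetD l1 i 0 ≠ 0 ∧ PySem.List.pyGetD l2 i 0 ≠ 0 then p.1 + 1 else 0
        (cur, if p.2 < cur then cur else p.2)) (0, best)).2
      = (scountOuter n l1 l2 i []).foldl max best := by
  intro k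
  induction k using Nat.strong_induction_on with
  | _ k IH =>
    intro i best hk hb
    by_cases hi : i < n
    · by_cases hj : i < scountInner n l1 l2 i
      · have hjn : scountInner n l1 l2 i ≤ n := scountInner_le n l1 l2 i (le_of_lt hi)
        have hcond := scountInner_cond n l1 l2 i
        rw [PySem.List.pyRange_one_append i (scountInner n l1 l2 i) n (by omega) hjn,
            List.foldl_append,
            runFold l1 l2 (scountInner n l1 l2 i - i).toNat i (scountInner n l1 l2 i) 0 best rfl
              (by omega) (fun m h1 h2 => hcond m h1 h2) le_rfl hb]
        conv_rhs => rw [scountOuter]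
        rw [dif_pos hi, dif_pos hj,
            scountOuter_acc n l1 l2 (n - scountInner n l1 l2 i).toNat _ rfl
              ([] ++ [scountInner n l1 l2 i - i])]
        simp only [List.nil_append, List.cons_append, List.foldl_cons, List.nil_append]
        by_cases hjn' : scountInner n l1 l2 i < n
        · have hstop := scountInner_stop n l1 l2 i
          have hnc : ¬(PySem.List.pyGetD l1 (scountInner n l1 l2 i) 0 ≠ 0 ∧
              PySem.List.pyGetD l2 (scountInner n l1 l2 i) 0 ≠ 0) := fun hc => hstop ⟨hjn', hc⟩
          rw [PySem.List.pyRange_one_cons hjn']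
          simp only [List.foldl_cons]
          rw [if_neg hnc]
          have h0 : (if max best (0 + (scountInner n l1 l2 i - i)) < (0:Int) then (0:Int)
              else max best (0 + (scountInner n l1 l2 i - i))) = max best (0 + (scountInner n l1 l2 i - i)) := by
            rw [if_neg (by simp only [not_lt, zero_add]; exact le_max_of_le_left hb)]
          rw [h0]
          have hinner : scountInner n l1 l2 (scountInner n l1 l2 i) = scountInner n l1 l2 i := by
            rw [scountInner, if_neg hstop]
          conv_rhs => rw [scountOuter]
          rw [dif_pos hjn']
          simp only [hinner]
          rw [dif_neg (lt_irrefl _)]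
          rw [IH (n - (scountInner n l1 l2 i + 1)).toNat (by omega) _ _ rfl (by positivity)]
          congr 1
          omega
        · have hjeq : scountInner n l1 l2 i = n := by omega
          rw [PySem.List.pyRange_one_eq_nil (by omega)]
          conv_rhs => rw [scountOuter]
          rw [dif_neg (by omega : ¬ scountInner n l1 l2 i < n)]
          simp only [List.foldl_nil]
          congr 1
          omega
      · have hji : scountInner n l1 l2 i = i := le_antisymm (by omega) (scountInner_ge n l1 l2 i)
        have hstop := scountInner_stop n l1 l2 i
        rw [hji] at hstop
        have hnc : ¬(PySem.List.pyGetD l1 i 0 ≠ 0 ∧ PySem.List.pyGetD l2 i 0 ≠ 0) :=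
          fun hc => hstop ⟨hi, hc⟩
        rw [PySem.List.pyRange_one_cons hi]
        simp only [List.foldl_cons]
        rw [if_neg hnc]
        have h0 : (if best < (0:Int) then (0:Int) else best) = best := by rw [if_neg]; omega
        rw [h0]
        conv_rhs => rw [scountOuter]
        rw [dif_pos hi, dif_neg hj]
        exact IH (n - (i + 1)).toNat (by omega) _ _ rfl hb
    · rw [PySem.List.pyRange_one_eq_nil (by omega)]
      conv_rhs => rw [scountOuter]
      rw [dif_neg hi]
      simp

theorem maxGetD_foldl (l : List Int) (h : ∀ x ∈ l, 0 ≤ x) :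
    (PySem.List.max? l (fun x => x)).getD 0 = l.foldl max 0 := by
  cases l with
  | nil => simp [PySem.List.max?]
  | cons x t =>
    rw [PySem.List.max?_id_cons, Option.getD_some]
    simp only [List.foldl_cons]
    have : max (0:Int) x = x := max_eq_right (h x (List.mem_cons_self))
    rw [this]

theorem scountOuter_nonneg (n : Int) (l1 l2 : List Int) : ∀ (k : Nat) (i : Int), (n - i).toNat = k →
    ∀ runs, (∀ x ∈ runs, 0 ≤ x) → ∀ x ∈ scountOuter n l1 l2 i runs, 0 ≤ x := by
  intro k
  induction k using Nat.strong_induction_on with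
  | _ k IH =>
    intro i hk runs hruns
    rw [scountOuter]
    by_cases hi : i < n
    · rw [dif_pos hi]
      by_cases hj : i < scountInner n l1 l2 i
      · rw [dif_pos hj]
        exact IH (n - scountInner n l1 l2 i).toNat (by omega) _ rfl _
          (by intro x hx
              rcases List.mem_append.mp hx with h | h
              · exact hruns x h
              · simp only [List.mem_singleton] at h; omega)
      · rw [dif_neg hj]
        exact IH (n - (i + 1)).toNat (by omega) _ rfl _ hruns
    · rw [dif_neg hi]; exact hruns

-- ===== VERDICT (by name: the statement is the Claim_ definition above) =====
theorem scount_spec : Claim_equal_scount := by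
  intro n l1 l2 _ _
  unfold Spec_scount scount scount_alt
  have h := scount_loop_eq (fun i => PySem.List.pyGetD l1 i 0 ≠ 0 ∧ PySem.List.pyGetD l2 i 0 ≠ 0)
    (PySem.List.pyRange 0 n 1) 0 0 [] le_rfl rfl
  obtain ⟨-, t', hA, hB, -⟩ := h
  rw [maxGetD_foldl _ (scountOuter_nonneg n l1 l2 (n - 0).toNat 0 rfl [] (by simp))]
  simp only [hA, PySem.List.max?_id_cons, Option.getD_some]
  rw [← hB]
  exact mainLoop n l1 l2 (n - 0).toNat 0 0 rfl le_rfl
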